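-- pv_equiv track=rewrite | github.com/kaHaleMaKai/lishpy | bootstrap/core.py | split_ns_name
-- ===== SOURCE A (Python) =====
-- from typing import Generator, Callable, Union
--
-- def split_ns_name(name: str) -> Generator[str, None, None]:
--     i = 0
--     length = len(name)
--     while i < length:
--         try:
--             i = name.index(".", i)
--             yield name[:i]
--             i += 1
--         except ValueError:
--             yield name
--             break
-- ===== SOURCE B (Python) =====
-- def split_ns_name(name):
--     out = []
--     for i, c in enumerate(name):
--         if c == '.':
--             out.append(name[:i])
--     if name and not name.endswith('.'):
--         out.append(name)
--     return out
-- ===== Notes on version B (the rewrite author's own statement) =====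
-- stated objective: idiomatic
-- what changed: Replaced the exception-driven while loop that jumps via str.index and try/except ValueError with a single enumerate scan collecting a prefix at each dot, plus one explicit final guard (name nonempty and no trailing dot) for appending the full name.
import Mathlib
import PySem

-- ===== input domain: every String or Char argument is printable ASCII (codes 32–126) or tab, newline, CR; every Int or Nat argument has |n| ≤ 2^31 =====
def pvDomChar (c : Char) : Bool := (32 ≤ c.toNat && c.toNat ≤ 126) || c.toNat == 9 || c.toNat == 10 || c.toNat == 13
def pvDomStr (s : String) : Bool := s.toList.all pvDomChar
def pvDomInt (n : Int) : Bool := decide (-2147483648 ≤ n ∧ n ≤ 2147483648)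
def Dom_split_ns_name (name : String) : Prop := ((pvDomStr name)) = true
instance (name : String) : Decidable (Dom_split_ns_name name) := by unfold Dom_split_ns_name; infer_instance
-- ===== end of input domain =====

-- B replaces A's exception-driven while loop (str.index + try/except) with a single
-- enumerate scan collecting a prefix at each '.' plus one explicit final guard; same cost, more idiomatic.

-- ===== PORT A =====
-- termination fact for A's loop: a successful name.index(".", i) returns an index in [i, len)
lemma pvFindFrom_lt (name : String) (i : Nat) (hi : i < name.toList.length)
    (hj : ¬ PySem.Str.findFrom name "." (i : Int) none = -1) :
    name.toList.length - ((PySem.Str.findFrom name "." (i : Int) none).toNat + 1)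
      < name.toList.length - i := by
  rw [PySem.Str.findFrom_eq] at hj ⊢
  have hspec := PySem.Chars.findFrom_natCast_spec name.toList ".".toList i (le_of_lt hi) hj
  obtain ⟨h1, h2, -⟩ := hspec
  have h3 : (PySem.Chars.findFrom name.toList ".".toList (i : Int) none).toNat < name.toList.length := by
    have hne := h2.ne_nil
    simpa using hne
  omega

def splitLoopA (name : String) (i : Nat) : List String :=
  if hi : i < name.toList.length then
    let j := PySem.Str.findFrom name "." (i : Int) none
    if hj : j = -1 then
      [name]                                   -- except ValueError: yield name; break
    else
      PySem.Str.slice name none (some j) :: splitLoopA name (j.toNat + 1)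
  else []
termination_by name.toList.length - i
decreasing_by exact pvFindFrom_lt name i hi hj

def split_ns_name (name : String) : List String := splitLoopA name 0

-- ===== PORT B =====
def split_ns_name_alt (name : String) : List String :=
  let out := (PySem.List.enumerate name.toList).foldl
      (fun acc p => if p.2 == '.' then acc ++ [PySem.Str.slice name none (some p.1)] else acc) []
  if name != "" && !(PySem.Str.endswith name ".") then out ++ [name] else out

-- ===== PRECONDITION & SPEC =====
def Spec_split_ns_name (name : String) (out : List String) : Prop := out = split_ns_name_alt name
instance (name : String) (out : List String) : Decidable (Spec_split_ns_name name out) := by unfold Spec_split_ns_name; infer_instance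

-- ===== CLAIM (what is proved, stated in full; the proofs are below) =====
def Claim_equal_split_ns_name : Prop := ∀ (name : String), Dom_split_ns_name name → Spec_split_ns_name name (split_ns_name name)

-- ===== LEMMAS AND PROOFS =====

lemma pvSingle_prefix_iff (c : Char) (l : List Char) : [c] <+: l ↔ l.head? = some c := by
  cases l with
  | nil => simp
  | cons x xs => simp [List.cons_prefix_cons, eq_comm]

lemma pvSingle_infix_of_mem {c : Char} {l : List Char} (h : c ∈ l) : [c] <:+: l := by
  obtain ⟨s, t, rfl⟩ := List.append_of_mem h
  exact ⟨s, t, by simp⟩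

-- characterisation of A's loop from index i: prefixes at every dot position ≥ i, then the
-- full name iff the loop is still running and the name does not end in a dot
lemma pvLoopA_eq (n : Nat) : ∀ (name : String) (i : Nat),
    name.toList.length - i ≤ n → i ≤ name.toList.length →
    splitLoopA name i =
      ((PySem.List.enumerate (name.toList.drop i) (i : Int)).filter (fun p => p.2 == '.')).map
          (fun p => PySem.Str.slice name none (some p.1))
      ++ (if i < name.toList.length ∧ PySem.Str.endswith name "." = false then [name] else []) := by
  induction n with
  | zero =>
    intro name i hn hi
    have : i = name.toList.length := by omega
    subst this
    have hd : List.drop name.length name.toList = [] :=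
      List.drop_eq_nil_of_le (by simp)
    rw [splitLoopA]
    simp [hd]
  | succ n ih =>
    intro name i hn hi
    have hdot : (".".toList : List Char) = ['.'] := by decide
    by_cases hi' : i < name.toList.length
    · rw [splitLoopA]
      simp only [dif_pos hi']
      by_cases hj : PySem.Str.findFrom name "." (i : Int) none = -1
      · -- no dot from i: ValueError branch
        rw [dif_pos hj]
        rw [PySem.Str.findFrom_eq] at hj
        have hnin : ¬ (['.'] : List Char) <:+: name.toList.drop i := by
          rw [← hdot]
          exact (PySem.Chars.findFrom_natCast_eq_neg_one_iff name.toList ".".toList i hi'.le).mp hj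
        have hfil : (PySem.List.enumerate (name.toList.drop i) (i : Int)).filter
            (fun p => p.2 == '.') = [] := by
          refine List.filter_eq_nil_iff.mpr ?_
          intro p hp
          obtain ⟨k, hk, rfl⟩ := (PySem.List.mem_enumerate_iff _ _ _).mp hp
          simp only [beq_iff_eq]
          intro hc
          exact hnin (pvSingle_infix_of_mem (hc ▸ List.getElem_mem hk))
        have hend : PySem.Str.endswith name "." = false := by
          by_contra h
          have h' : PySem.Str.endswith name "." = true := by
            cases hv : PySem.Str.endswith name "." <;> simp_all
          rw [PySem.Str.endswith_eq] at h'
          obtain ⟨t, ht⟩ := (PySem.Chars.endswith_iff _ _).mp h'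
          have hl : name.toList.length = name.length := by simp
          have hlen : i ≤ t.length := by
            have := congrArg List.length ht
            simp at this
            omega
          refine hnin ⟨t.drop i, [], ?_⟩
          rw [← hdot, ← ht, List.drop_append_of_le_length hlen]
          simp
        rw [hfil]
        simp only [List.map_nil, List.nil_append]
        rw [if_pos ⟨hi', hend⟩]
      · -- dot found at j
        rw [dif_neg hj]
        rw [PySem.Str.findFrom_eq] at hj
        rw [hdot] at hj
        obtain ⟨h1, h2, h3⟩ :=
          PySem.Chars.findFrom_natCast_spec name.toList ['.'] i hi'.le hj
        obtain ⟨m, hjm⟩ : ∃ m : Nat,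
            PySem.Chars.findFrom name.toList ['.'] (i : Int) none = (m : Int) :=
          ⟨(PySem.Chars.findFrom name.toList ['.'] (i : Int) none).toNat, by omega⟩
        rw [hjm] at h1 h2 h3
        simp only [Int.toNat_natCast] at h2 h3
        have him : i ≤ m := by exact_mod_cast h1
        have hhd : name.toList[m]? = some '.' := by
          have := (pvSingle_prefix_iff '.' (name.toList.drop m)).mp h2
          rwa [List.head?_drop] at this
        have hm : m < name.toList.length := by
          by_contra h
          rw [List.getElem?_eq_none (by omega)] at hhd
          simp at hhd
        have hgetm : name.toList[m] = '.' := by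
          have := List.getElem?_eq_getElem (l := name.toList) (i := m) hm
          rw [this] at hhd
          exact Option.some.inj hhd
        have hdropm : name.toList.drop m = '.' :: name.toList.drop (m + 1) := by
          rw [List.drop_eq_getElem_cons hm, hgetm]
        have hsplit : name.toList.drop i
            = (name.toList.drop i).take (m - i) ++ '.' :: name.toList.drop (m + 1) := by
          conv_lhs => rw [← List.take_append_drop (m - i) (name.toList.drop i)]
          rw [List.drop_drop, show i + (m - i) = m from by omega, hdropm]
        have hseglen : ((name.toList.drop i).take (m - i)).length = m - i := by
          rw [List.length_take, List.length_drop]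
          omega
        -- rewrite the recursive call and the yielded slice to use m
        rw [show PySem.Str.findFrom name "." (i : Int) none = (m : Int) from by
          rw [PySem.Str.findFrom_eq, hdot]; exact hjm]
        simp only [Int.toNat_natCast]
        rw [hsplit, PySem.List.enumerate_append, hseglen,
            show (i : Int) + ((m - i : Nat) : Int) = (m : Int) from by omega,
            PySem.List.enumerate_cons]
        have hfilseg : (PySem.List.enumerate ((name.toList.drop i).take (m - i)) (i : Int)).filter
            (fun p => p.2 == '.') = [] := by
          refine List.filter_eq_nil_iff.mpr ?_
          intro p hp
          obtain ⟨k, hk, rfl⟩ := (PySem.List.mem_enumerate_iff _ _ _).mp hp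
          simp only [beq_iff_eq]
          intro hc
          rw [hseglen] at hk
          have hik : i + k < name.toList.length := by omega
          have hgk : ((name.toList.drop i).take (m - i))[k] = name.toList[i + k]'hik := by
            rw [List.getElem_take, List.getElem_drop]
          refine h3 (i + k) (by omega) (by omega) ?_
          rw [pvSingle_prefix_iff, List.head?_drop, List.getElem?_eq_getElem hik]
          rw [hgk] at hc
          rw [hc]
        rw [List.filter_append, hfilseg, List.nil_append, List.filter_cons_of_pos (by simp),
            List.map_cons]
        have hIH := ih name (m + 1) (by omega) (by omega)
        rw [show (m : Int) + 1 = ((m + 1 : Nat) : Int) from by push_cast; ring]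
        have hguard : (if i < name.toList.length ∧ PySem.Str.endswith name "." = false
              then [name] else ([] : List String))
            = (if m + 1 < name.toList.length ∧ PySem.Str.endswith name "." = false
              then [name] else []) := by
          by_cases he : PySem.Str.endswith name "." = false
          · have hm1 : m + 1 < name.toList.length := by
              by_contra h
              have hsuf : ".".toList <:+ name.toList := by
                refine ⟨name.toList.take m, ?_⟩
                have hnil : name.toList.drop (m + 1) = [] :=
                  List.drop_eq_nil_of_le (by omega)
                rw [hdot]
                conv_rhs => rw [← List.take_append_drop m name.toList]
                rw [hdropm, hnil]
              have : PySem.Str.endswith name "." = true := by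
                rw [PySem.Str.endswith_eq]
                exact (PySem.Chars.endswith_iff _ _).mpr hsuf
              rw [this] at he
              simp at he
            rw [if_pos ⟨hi', he⟩, if_pos ⟨hm1, he⟩]
          · rw [if_neg (fun hcon => he hcon.2), if_neg (fun hcon => he hcon.2)]
        rw [hguard, List.cons_append, ← hIH]
    · have : i = name.toList.length := by omega
      subst this
      have hd : List.drop name.length name.toList = [] :=
        List.drop_eq_nil_of_le (by simp)
      rw [splitLoopA]
      simp [hd]

-- ===== VERDICT (by name: the statement is the Claim_ definition above) =====
theorem split_ns_name_spec : Claim_equal_split_ns_name := by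
  intro name _
  unfold Spec_split_ns_name split_ns_name split_ns_name_alt
  rw [pvLoopA_eq name.toList.length name 0 (by omega) (by omega)]
  rw [PySem.List.foldl_append_if]
  simp only [List.drop_zero, Nat.cast_zero, List.nil_append]
  by_cases h1 : name = ""
  · subst h1
    simp
  · by_cases h2 : PySem.Chars.endswith name.toList ['.'] = false
    · simp [h1, h2]
    · have h2t : PySem.Chars.endswith name.toList ['.'] = true := by
        cases hv : PySem.Chars.endswith name.toList ['.'] <;> simp_all
      simp [h2t]
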